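-- pv_equiv track=rewrite | github.com/Kernic/Projet_Informatique_2019_ISEN | agregateur.py | writeGraph
-- ===== SOURCE A (Python) =====
-- def writeGraph(liste,indicatif,pas,contenuPageHtml):
--     flag=0
--     compteur1=0
--     compteur2=0
--     compteur3=pas
--
--     contenuPageHtmlBis=contenuPageHtml
--     for i in contenuPageHtml:
--         if i =='//END DRAW GRAPH\n':
--             flag=0
--
--         if flag==1:
--
--             while compteur2 != len(liste):
--                 a='lineGraph.addPoint('+str(compteur3)+','+liste[compteur2]+');\n'
--                 contenuPageHtmlBis.insert(compteur1+compteur2,a)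
--                 compteur2+=1
--                 compteur3+=pas
--         if i=='//BEGIN DRAW GRAPH\n':
--             flag=1
--
--         compteur1+=1
--
--     return(contenuPageHtmlBis)
-- ===== SOURCE B (Python) =====
-- def writeGraph(liste, indicatif, pas, contenuPageHtml):
--     armed = False
--     for j, line in enumerate(contenuPageHtml):
--         if line == '//END DRAW GRAPH\n':
--             armed = False
--         elif armed:
--             block = ['lineGraph.addPoint(' + str((k + 1) * pas) + ',' + v + ');\n'
--                      for k, v in enumerate(liste)]
--             return contenuPageHtml[:j] + block + contenuPageHtml[j:]
--         if line == '//BEGIN DRAW GRAPH\n':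
--             armed = True
--     return contenuPageHtml
-- ===== Notes on version B (the rewrite author's own statement) =====
-- stated objective: alternative
-- what changed: Instead of A's flag-driven scan that repeatedly calls list.insert (each shifting the tail) while iterating the very list it mutates, B scans once for the first BEGIN marker whose successor line exists and is not the END marker, builds the point block in one comprehension, and returns prefix + block + suffix by slicing.
import Mathlib
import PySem

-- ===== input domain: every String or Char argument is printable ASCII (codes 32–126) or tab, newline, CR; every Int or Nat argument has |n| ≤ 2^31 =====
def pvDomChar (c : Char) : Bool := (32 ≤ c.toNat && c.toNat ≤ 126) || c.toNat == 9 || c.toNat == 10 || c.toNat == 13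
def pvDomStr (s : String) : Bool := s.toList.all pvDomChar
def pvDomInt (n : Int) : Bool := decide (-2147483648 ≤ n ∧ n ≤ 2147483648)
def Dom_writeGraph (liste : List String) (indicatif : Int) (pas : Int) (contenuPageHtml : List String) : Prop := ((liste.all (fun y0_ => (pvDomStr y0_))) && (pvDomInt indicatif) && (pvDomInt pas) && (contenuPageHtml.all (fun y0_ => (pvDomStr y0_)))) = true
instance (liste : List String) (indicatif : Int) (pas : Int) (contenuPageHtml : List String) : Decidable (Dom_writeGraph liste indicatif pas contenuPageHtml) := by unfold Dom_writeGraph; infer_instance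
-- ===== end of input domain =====

-- B replaces A's repeated list.insert scan by locating the insertion point once and splicing a
-- block built once.  A mutates contenuPageHtml in place and returns it; B returns a fresh list —
-- the equivalence proved here is about the RETURN value only.

-- ===== PORT A =====
def pvEndMark : String := "//END DRAW GRAPH\n"
def pvBeginMark : String := "//BEGIN DRAW GRAPH\n"
-- a = 'lineGraph.addPoint(' + str(c3) + ',' + v + ');\n'
def pvMkPoint (c3 : Int) (v : String) : String :=
  "lineGraph.addPoint(" ++ PySem.Int.toStr c3 ++ "," ++ v ++ ");\n"

-- the inner 'while compteur2 != len(liste)' loop; compteur2 only ever steps 0,1,…,len(liste), so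
-- the loop runs exactly liste.length - c2 times: that is the fuel passed at the call site (a fuel
-- guard for totality only; the guard c2 < liste.length is Python's 'compteur2 != len(liste)' on
-- every reachable state)
def wgInner (liste : List String) (pas : Int) (idx : Nat) : Nat → List String → Nat → Int → List String × Nat × Int
  | 0, cur, c2, c3 => (cur, c2, c3)
  | fuel + 1, cur, c2, c3 =>
    if c2 < liste.length then
      let a := pvMkPoint c3 (PySem.List.pyGetD liste (c2 : Int) "")
      wgInner liste pas idx fuel (PySem.List.insert cur ((idx + c2 : Nat) : Int) a) (c2 + 1) (c3 + pas)
    else (cur, c2, c3)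

-- the 'for i in contenuPageHtml' loop of A over the list it is mutating; compteur1 always equals
-- the running iteration index idx; the iteration count is bounded by the final length
-- page.length + liste.length, which is the fuel passed at the call site (totality only)
def wgLoop (liste : List String) (pas : Int) : Nat → List String → Nat → Nat → Nat → Int → List String
  | 0, cur, _, _, _, _ => cur
  | fuel + 1, cur, idx, flag, c2, c3 =>
    if h : idx < cur.length then
      let i := cur[idx]
      let flag1 := if i = pvEndMark then 0 else flag
      if flag1 = 1 then
        let r := wgInner liste pas idx (liste.length - c2) cur c2 c3
        wgLoop liste pas fuel r.1 (idx + 1) (if i = pvBeginMark then 1 else flag1) r.2.1 r.2.2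
      else
        wgLoop liste pas fuel cur (idx + 1) (if i = pvBeginMark then 1 else flag1) c2 c3
    else cur

def writeGraph (liste : List String) (indicatif : Int) (pas : Int) (contenuPageHtml : List String) : List String :=
  wgLoop liste pas (contenuPageHtml.length + liste.length) contenuPageHtml 0 0 0 pas

-- ===== PORT B =====
-- block = ['lineGraph.addPoint(' + str((k+1)*pas) + ',' + v + ');\n' for k, v in enumerate(liste)]
def altBlock (liste : List String) (pas : Int) : List String :=
  (PySem.List.enumerate liste 0).map (fun kv => pvMkPoint ((kv.1 + 1) * pas) kv.2)

-- the single scan of Source B: j counts the prefix already passed, rest is the remaining suffix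
def altLoop (liste : List String) (pas : Int) (page : List String) : List String → Nat → Bool → List String
  | [], _, _ => page
  | line :: rs, j, armed =>
    if line = pvEndMark then altLoop liste pas page rs (j + 1) false
    else if armed then
      PySem.List.slice page none (some (j : Int)) ++ altBlock liste pas ++ PySem.List.slice page (some (j : Int)) none
    else altLoop liste pas page rs (j + 1) (decide (line = pvBeginMark))

def writeGraph_alt (liste : List String) (indicatif : Int) (pas : Int) (contenuPageHtml : List String) : List String :=
  altLoop liste pas contenuPageHtml contenuPageHtml 0 false

-- ===== PRECONDITION & SPEC =====
def Spec_writeGraph (liste : List String) (indicatif : Int) (pas : Int) (contenuPageHtml : List String) (out : List String) : Prop := out = writeGraph_alt liste indicatif pas contenuPageHtml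
instance (liste : List String) (indicatif : Int) (pas : Int) (contenuPageHtml : List String) (out : List String) : Decidable (Spec_writeGraph liste indicatif pas contenuPageHtml out) := by unfold Spec_writeGraph; infer_instance

-- ===== CLAIM (what is proved, stated in full; the proofs are below) =====
def Claim_equal_writeGraph : Prop := ∀ (liste : List String) (indicatif : Int) (pas : Int) (contenuPageHtml : List String), Dom_writeGraph liste indicatif pas contenuPageHtml → Spec_writeGraph liste indicatif pas contenuPageHtml (writeGraph liste indicatif pas contenuPageHtml)

-- ===== LEMMAS AND PROOFS =====

-- the list of point lines A's inner loop inserts, in insertion order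
def blockFrom (pas : Int) : List String → Int → List String
  | [], _ => []
  | v :: vs, c3 => pvMkPoint c3 v :: blockFrom pas vs (c3 + pas)

theorem wgInner_closed (liste : List String) (pas : Int) (idx : Nat) :
    ∀ (fuel c2 : Nat) (cur : List String) (c3 : Int),
      fuel = liste.length - c2 → c2 ≤ liste.length → idx + c2 ≤ cur.length →
      wgInner liste pas idx fuel cur c2 c3 =
        (cur.take (idx + c2) ++ blockFrom pas (liste.drop c2) c3 ++ cur.drop (idx + c2),
         liste.length,
         c3 + ((liste.length - c2 : Nat) : Int) * pas) := by
  intro fuel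
  induction' fuel with k ih <;> intro c2 cur c3 hfuel hc2 hlen
  · have hc : c2 = liste.length := by omega
    rw [wgInner]
    simp [hc, blockFrom]
  · have hlt : c2 < liste.length := by omega
    rw [wgInner]
    simp only [hlt, if_true, ite_true]
    have hget : PySem.List.pyGetD liste (c2 : Int) "" = liste[c2] := by
      rw [PySem.List.pyGetD_natCast]; exact List.getD_eq_getElem liste "" hlt
    have hins : PySem.List.insert cur ((idx + c2 : Nat) : Int)
        (pvMkPoint c3 (PySem.List.pyGetD liste (c2 : Int) "")) =
        cur.take (idx + c2) ++ pvMkPoint c3 liste[c2] :: cur.drop (idx + c2) := by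
      rw [hget, PySem.List.insert_natCast _ _ _ hlen]
    rw [hins]
    rw [ih (c2 + 1) _ (c3 + pas) (by omega) (by omega) (by simp; omega)]
    have h1 : (cur.take (idx + c2) ++ pvMkPoint c3 liste[c2] :: cur.drop (idx + c2)).take (idx + c2 + 1)
        = cur.take (idx + c2) ++ [pvMkPoint c3 liste[c2]] := by
      rw [List.take_append]; simp [Nat.min_eq_left (show idx + c2 ≤ cur.length by omega)]
    have h2 : (cur.take (idx + c2) ++ pvMkPoint c3 liste[c2] :: cur.drop (idx + c2)).drop (idx + c2 + 1)
        = cur.drop (idx + c2) := by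
      rw [List.drop_append]; simp [Nat.min_eq_left (show idx + c2 ≤ cur.length by omega)]
    have h3 : liste.drop c2 = liste[c2] :: liste.drop (c2 + 1) := List.drop_eq_getElem_cons hlt
    rw [show idx + (c2 + 1) = idx + c2 + 1 by omega, h1, h2, h3]
    refine Prod.ext ?_ (Prod.ext rfl ?_)
    · simp [blockFrom]
    · simp only
      have h4 : (liste.length - c2 : Nat) = (liste.length - (1 + c2) : Nat) + 1 := by omega
      rw [h4]
      push_cast
      ring

-- once compteur2 has reached len(liste) the list never changes again: the loop returns it
theorem wg_done (liste : List String) (pas : Int) :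
    ∀ (fuel : Nat) (cur : List String) (idx flag : Nat) (c3 : Int),
      wgLoop liste pas fuel cur idx flag liste.length c3 = cur := by
  intro fuel
  induction' fuel with k ih <;> intro cur idx flag c3
  · rfl
  · rw [wgLoop]
    by_cases h : idx < cur.length
    · rw [dif_pos h]
      have hinner : wgInner liste pas idx (liste.length - liste.length) cur liste.length c3
          = (cur, liste.length, c3) := by
        rw [Nat.sub_self, wgInner]
      simp only [hinner]
      split_ifs <;> exact ih cur (idx + 1) _ c3
    · rw [dif_neg h]

theorem block_eq (liste : List String) (pas : Int) :
    ∀ (vs : List String) (n : Int) (c3 : Int), c3 = (n + 1) * pas →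
      blockFrom pas vs c3 = (PySem.List.enumerate vs n).map (fun kv => pvMkPoint ((kv.1 + 1) * pas) kv.2) := by
  intro vs
  induction' vs with v vs ih <;> intro n c3 hc3
  · simp [blockFrom, PySem.List.enumerate_nil]
  · subst hc3
    rw [blockFrom, PySem.List.enumerate_cons, List.map_cons]
    exact congrArg _ (ih (n + 1) _ (by ring))

theorem wg_corr (liste : List String) (pas : Int) (page : List String) :
    ∀ (rest : List String) (j flag fuel : Nat), j ≤ page.length → rest = page.drop j →
      flag = 0 ∨ flag = 1 → rest.length ≤ fuel →
      wgLoop liste pas fuel page j flag 0 pas = altLoop liste pas page rest j (flag == 1) := by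
  intro rest
  induction' rest with line rs ih <;> intro j flag fuel hj hrest hflag hfuel
  · have hge : ¬ j < page.length := by
      intro hlt
      have := congrArg List.length hrest
      simp [List.length_drop] at this
      omega
    cases fuel with
    | zero => rfl
    | succ k => rw [wgLoop, dif_neg hge]; rfl
  · have hjlt : j < page.length := by
      by_contra hge
      rw [List.drop_eq_nil_of_le (by omega)] at hrest
      exact List.cons_ne_nil line rs hrest
    have hcons : page[j] :: page.drop (j + 1) = line :: rs := by
      rw [← List.drop_eq_getElem_cons hjlt]; exact hrest.symm
    have hline : page[j] = line := (List.cons.injEq _ _ _ _ ▸ hcons).1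
    have hrs : rs = page.drop (j + 1) := ((List.cons.injEq _ _ _ _ ▸ hcons).2).symm
    have hne : ¬ (pvEndMark = pvBeginMark) := by decide
    obtain ⟨k, rfl⟩ : ∃ k, fuel = k + 1 := by
      cases fuel with
      | zero => simp at hfuel
      | succ k => exact ⟨k, rfl⟩
    rw [wgLoop, dif_pos hjlt]
    by_cases he : line = pvEndMark
    · subst he
      simp only [hline, if_pos rfl, if_neg hne, show (0 : Nat) ≠ 1 by decide, ite_false, if_false]
      rw [altLoop, if_pos rfl]
      exact ih (j + 1) 0 k (by omega) hrs (Or.inl rfl) (by simpa using Nat.lt_succ_iff.mp (by simpa using hfuel))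
    · by_cases hf : flag = 1
      · subst hf
        simp only [hline, if_neg he, if_pos rfl]
        rw [wgInner_closed liste pas j (liste.length - 0) 0 page pas rfl (by omega) (by omega)]
        simp only [List.drop_zero, Nat.add_zero]
        rw [wg_done]
        rw [altLoop, if_neg he]
        simp only [show (1 == 1) = true by decide, if_pos rfl, ite_true]
        rw [PySem.List.slice_to_natCast, PySem.List.slice_from_natCast]
        rw [show altBlock liste pas = blockFrom pas liste pas from
          (block_eq liste pas liste 0 pas (by ring)).symm]
      · have hf0 : flag = 0 := by omega
        subst hf0
        simp only [hline, if_neg he, show (0 : Nat) ≠ 1 by decide, ite_false, if_false]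
        rw [altLoop, if_neg he]
        simp only [show (0 == 1) = false by decide, if_false, ite_false, Bool.false_eq_true]
        by_cases hb : line = pvBeginMark
        · simp only [hb, if_pos rfl]
          have := ih (j + 1) 1 k (by omega) hrs (Or.inr rfl) (by simpa using Nat.lt_succ_iff.mp (by simpa using hfuel))
          simpa [hb] using this
        · simp only [if_neg hb]
          have := ih (j + 1) 0 k (by omega) hrs (Or.inl rfl) (by simpa using Nat.lt_succ_iff.mp (by simpa using hfuel))
          simpa [hb] using this

-- ===== VERDICT (by name: the statement is the Claim_ definition above) =====
theorem writeGraph_spec : Claim_equal_writeGraph := by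
  intro liste indicatif pas page _
  unfold Spec_writeGraph writeGraph writeGraph_alt
  exact wg_corr liste pas page page 0 0 (page.length + liste.length) (by omega) (by simp)
    (Or.inl rfl) (by omega)
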